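-- pv_equiv track=rewrite | github.com/RainRat/diff2typo | multitool.py | _render_context_to_lines
-- ===== SOURCE A (Python) =====
-- from typing import Any, Callable, Iterable, List, Mapping, Sequence, Tuple, TextIO, Optional
--
-- BLUE = "\033[1;34m"
--
-- GREEN = "\033[1;32m"
--
-- MAGENTA = "\033[1;35m"
--
-- CYAN = "\033[1;36m"
--
-- RESET = "\033[0m"
--
-- BOLD = "\033[1m"
--
-- def _format_search_line(
--     filename: str,
--     line_idx: int,
--     line_content: str,
--     is_match: bool,
--     show_filename: bool,
--     line_numbers: bool,
--     use_color: bool,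
-- ) -> str:
--     """Formats a single line for search/scan output with optional filename and line number."""
--     sep_char = ":" if is_match else "-"
--
--     if not show_filename and not line_numbers:
--         return line_content
--
--     if use_color:
--         style = BOLD if is_match else ""
--         c_sep = style + CYAN
--         parts = []
--         if show_filename:
--             parts.append(f"{style}{MAGENTA}{filename}{RESET}")
--         if line_numbers:
--             parts.append(f"{style}{GREEN}{line_idx + 1}{RESET}")
--
--         if not parts:
--             return line_content
--
--         prefix = f"{c_sep}{sep_char}{RESET}".join(parts) + f"{c_sep}{sep_char}{RESET}"
--         return f"{prefix} {line_content}"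
--     else:
--         prefix_parts = []
--         if show_filename:
--             prefix_parts.append(filename)
--         if line_numbers:
--             prefix_parts.append(str(line_idx + 1))
--         raw_prefix = sep_char.join(prefix_parts) + sep_char
--         return f"{raw_prefix} {line_content}"
--
-- def _render_context_to_lines(
--     match_indices: Mapping[int, str],
--     file_contents: Sequence[str],
--     before_context: int,
--     after_context: int,
--     filename: str,
--     show_filename: bool,
--     line_numbers: bool,
--     use_color: bool,
-- ) -> List[str]:
--     """Renders match lines and their surrounding context lines into a list of strings."""
--     accumulated_lines = []
--     sorted_indices = sorted(match_indices.keys())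
--     last_rendered_idx = -1
--
--     for idx in sorted_indices:
--         # Determine block start and end
--         start = max(0, idx - before_context)
--         end = min(len(file_contents), idx + after_context + 1)
--
--         # If there's a gap between blocks, add separator
--         if last_rendered_idx != -1 and start > last_rendered_idx:
--             separator = f"{BOLD}{BLUE}--{RESET}" if use_color else "--"
--             accumulated_lines.append(separator)
--
--         # Render lines in the window that haven't been rendered yet
--         current_start = max(start, last_rendered_idx)
--         for j in range(current_start, end):
--             is_match = j in match_indices
--             content = match_indices[j] if is_match else file_contents[j]
--             accumulated_lines.append(
--                 _format_search_line(
--                     filename, j, content, is_match, show_filename, line_numbers, use_color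
--                 )
--             )
--
--         last_rendered_idx = end
--     return accumulated_lines
-- ===== SOURCE B (Python) =====
-- from typing import Any, Callable, Iterable, List, Mapping, Sequence, Tuple, TextIO, Optional
--
-- BLUE = "\033[1;34m"
-- GREEN = "\033[1;32m"
-- MAGENTA = "\033[1;35m"
-- CYAN = "\033[1;36m"
-- RESET = "\033[0m"
-- BOLD = "\033[1m"
--
-- def _format_search_line(
--     filename: str,
--     line_idx: int,
--     line_content: str,
--     is_match: bool,
--     show_filename: bool,
--     line_numbers: bool,
--     use_color: bool,
-- ) -> str:
--     """Formats a single line for search/scan output with optional filename and line number."""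
--     sep_char = ":" if is_match else "-"
--
--     if not show_filename and not line_numbers:
--         return line_content
--
--     if use_color:
--         style = BOLD if is_match else ""
--         c_sep = style + CYAN
--         parts = []
--         if show_filename:
--             parts.append(f"{style}{MAGENTA}{filename}{RESET}")
--         if line_numbers:
--             parts.append(f"{style}{GREEN}{line_idx + 1}{RESET}")
--
--         if not parts:
--             return line_content
--
--         prefix = f"{c_sep}{sep_char}{RESET}".join(parts) + f"{c_sep}{sep_char}{RESET}"
--         return f"{prefix} {line_content}"
--     else:
--         prefix_parts = []
--         if show_filename:
--             prefix_parts.append(filename)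
--         if line_numbers:
--             prefix_parts.append(str(line_idx + 1))
--         raw_prefix = sep_char.join(prefix_parts) + sep_char
--         return f"{raw_prefix} {line_content}"
--
--
-- def _line_for(match_indices, file_contents, filename, show_filename, line_numbers, use_color, j):
--     is_match = j in match_indices
--     content = match_indices[j] if is_match else file_contents[j]
--     return _format_search_line(filename, j, content, is_match, show_filename, line_numbers, use_color)
--
--
-- def _render_context_to_lines(
--     match_indices,
--     file_contents,
--     before_context,
--     after_context,
--     filename,
--     show_filename,
--     line_numbers,
--     use_color,
-- ):
--     """Interval version: build one window per match, merge overlapping/adjacent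
--     windows into consolidated ranges, then render each range, with a separator
--     between consecutive ranges."""
--     n = len(file_contents)
--     ranges = []
--     cur = None
--     for idx in sorted(match_indices.keys()):
--         s = max(0, idx - before_context)
--         e = min(n, idx + after_context + 1)
--         if cur is None:
--             cur = (s, e)
--         elif s <= cur[1]:
--             cur = (cur[0], max(cur[1], e))
--         else:
--             ranges.append(cur)
--             cur = (s, e)
--     if cur is not None:
--         ranges.append(cur)
--
--     sep = f"{BOLD}{BLUE}--{RESET}" if use_color else "--"
--     out = []
--     started = False
--     for (s, e) in ranges:
--         if started:
--             out.append(sep)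
--         started = True
--         for j in range(s, e):
--             out.append(_line_for(match_indices, file_contents, filename, show_filename, line_numbers, use_color, j))
--     return out
-- ===== Notes on version B (the rewrite author's own statement) =====
-- stated objective: alternative
-- what changed: B first merges the per-match context windows into consolidated ranges and then renders each range once with separators between ranges, instead of A's single pass that interleaves rendering with a last_rendered_idx sentinel; Pre_ excludes only the degenerate corner where a match key equals -after_context-2 (its empty pre-file window ends exactly at A's -1 sentinel) while a later key exists, where each encoding makes a different accidental separator choice.
import Mathlib
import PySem

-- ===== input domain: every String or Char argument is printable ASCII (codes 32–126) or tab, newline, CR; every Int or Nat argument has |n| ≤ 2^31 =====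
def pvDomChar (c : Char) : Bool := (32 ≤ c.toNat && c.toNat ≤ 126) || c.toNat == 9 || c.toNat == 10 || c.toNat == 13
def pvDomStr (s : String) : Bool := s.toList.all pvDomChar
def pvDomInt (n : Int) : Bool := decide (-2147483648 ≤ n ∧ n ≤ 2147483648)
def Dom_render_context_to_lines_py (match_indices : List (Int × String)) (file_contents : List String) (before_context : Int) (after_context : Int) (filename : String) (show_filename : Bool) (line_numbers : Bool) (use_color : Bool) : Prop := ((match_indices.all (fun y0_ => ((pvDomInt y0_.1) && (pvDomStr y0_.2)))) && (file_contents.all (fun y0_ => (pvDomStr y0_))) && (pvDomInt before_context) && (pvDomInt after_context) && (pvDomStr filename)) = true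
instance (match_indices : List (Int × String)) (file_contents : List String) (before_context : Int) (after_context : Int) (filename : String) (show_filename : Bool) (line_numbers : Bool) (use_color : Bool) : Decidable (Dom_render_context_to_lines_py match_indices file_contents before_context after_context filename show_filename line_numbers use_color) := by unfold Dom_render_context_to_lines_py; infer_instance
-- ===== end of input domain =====

-- B merges the per-match context windows into consolidated ranges first and then renders
-- each range once (separator between ranges), instead of A's single rendering pass driven
-- by a last_rendered_idx sentinel; same cost, different decomposition ("alternative").

-- ===== PORT A =====
def pyBLUE : String := "\x1B[1;34m"
def pyGREEN : String := "\x1B[1;32m"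
def pyMAGENTA : String := "\x1B[1;35m"
def pyCYAN : String := "\x1B[1;36m"
def pyRESET : String := "\x1B[0m"
def pyBOLD : String := "\x1B[1m"

def format_search_line (filename : String) (line_idx : Int) (line_content : String)
    (is_match : Bool) (show_filename : Bool) (line_numbers : Bool) (use_color : Bool) : String :=
  let sep_char : String := if is_match then ":" else "-"
  if !show_filename && !line_numbers then line_content
  else if use_color then
    let style := if is_match then pyBOLD else ""
    let c_sep := style ++ pyCYAN
    let parts : List String :=
      (if show_filename then [style ++ pyMAGENTA ++ filename ++ pyRESET] else []) ++
      (if line_numbers then [style ++ pyGREEN ++ PySem.Int.toStr (line_idx + 1) ++ pyRESET] else [])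
    if parts = [] then line_content
    else
      let pfx := PySem.Str.join (c_sep ++ sep_char ++ pyRESET) parts ++ (c_sep ++ sep_char ++ pyRESET)
      pfx ++ " " ++ line_content
  else
    let prefix_parts : List String :=
      (if show_filename then [filename] else []) ++
      (if line_numbers then [PySem.Int.toStr (line_idx + 1)] else [])
    let raw_prefix := PySem.Str.join sep_char prefix_parts ++ sep_char
    raw_prefix ++ " " ++ line_content

-- the 'for idx in sorted_indices' loop of A, state = (accumulated_lines, last_rendered_idx)
def renderLoopA (md : PySem.Dict Int String) (file_contents : List String)
    (before_context after_context : Int) (filename : String)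
    (show_filename line_numbers use_color : Bool) :
    List Int → List String → Int → List String
  | [], accumulated_lines, _ => accumulated_lines
  | idx :: rest, accumulated_lines, last_rendered_idx =>
    let start := max 0 (idx - before_context)
    let stop := min (file_contents.length : Int) (idx + after_context + 1)
    let acc1 := if last_rendered_idx ≠ -1 ∧ start > last_rendered_idx then
        accumulated_lines ++ [if use_color then pyBOLD ++ pyBLUE ++ "--" ++ pyRESET else "--"]
      else accumulated_lines
    let current_start := max start last_rendered_idx
    let acc2 := acc1 ++ (PySem.List.pyRange current_start stop 1).map (fun j =>
        let is_match := md.contains j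
        let content := if is_match then (md.get? j).getD "" else (PySem.List.pyGet? file_contents j).getD ""
        format_search_line filename j content is_match show_filename line_numbers use_color)
    renderLoopA md file_contents before_context after_context filename show_filename line_numbers use_color rest acc2 stop

def render_context_to_lines_py (match_indices : List (Int × String)) (file_contents : List String) (before_context : Int) (after_context : Int) (filename : String) (show_filename : Bool) (line_numbers : Bool) (use_color : Bool) : List String :=
  let md := PySem.Dict.ofList match_indices
  let sorted_indices := PySem.List.sorted md.keys (fun x => x) false
  renderLoopA md file_contents before_context after_context filename show_filename line_numbers use_color sorted_indices [] (-1)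

-- ===== PORT B =====
def pvLineFor (md : PySem.Dict Int String) (file_contents : List String) (filename : String)
    (show_filename line_numbers use_color : Bool) (j : Int) : String :=
  let is_match := md.contains j
  let content := if is_match then (md.get? j).getD "" else (PySem.List.pyGet? file_contents j).getD ""
  format_search_line filename j content is_match show_filename line_numbers use_color

-- B's first loop: merge the sorted context windows into consolidated ranges
def mergeLoopB (before_context after_context n : Int) :
    List Int → List (Int × Int) → Option (Int × Int) → List (Int × Int)
  | [], ranges, cur => match cur with | none => ranges | some c => ranges ++ [c]
  | idx :: rest, ranges, cur =>
    let s := max 0 (idx - before_context)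
    let e := min n (idx + after_context + 1)
    match cur with
    | none => mergeLoopB before_context after_context n rest ranges (some (s, e))
    | some c =>
      if s ≤ c.2 then mergeLoopB before_context after_context n rest ranges (some (c.1, max c.2 e))
      else mergeLoopB before_context after_context n rest (ranges ++ [c]) (some (s, e))

-- B's second loop: render each consolidated range, separator between ranges
def renderLoopB (f : Int → String) (sep : String) :
    List (Int × Int) → List String → Bool → List String
  | [], out, _ => out
  | r :: t, out, started =>
    let out1 := if started then out ++ [sep] else out
    let out2 := out1 ++ (PySem.List.pyRange r.1 r.2 1).map f
    renderLoopB f sep t out2 true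

def render_context_to_lines_py_alt (match_indices : List (Int × String)) (file_contents : List String) (before_context : Int) (after_context : Int) (filename : String) (show_filename : Bool) (line_numbers : Bool) (use_color : Bool) : List String :=
  let md := PySem.Dict.ofList match_indices
  let n : Int := file_contents.length
  let ranges := mergeLoopB before_context after_context n (PySem.List.sorted md.keys (fun x => x) false) [] none
  let sep := if use_color then pyBOLD ++ pyBLUE ++ "--" ++ pyRESET else "--"
  renderLoopB (pvLineFor md file_contents filename show_filename line_numbers use_color) sep ranges [] false

-- ===== PRECONDITION & SPEC =====
-- Pre_ excludes only the degenerate corner where some match key equals -after_context - 2 (a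
-- match at a negative, pre-file position whose empty context window ends exactly at A's
-- last_rendered_idx = -1 sentinel) while a later match key exists: there the presence of the
-- '--' separator next to that empty invisible window is an accident of each encoding (A's
-- sentinel suppresses it, B's uniform between-ranges rule emits it) and neither choice is
-- specified, so nothing is claimed there.
def Pre_render_context_to_lines_py (match_indices : List (Int × String)) (file_contents : List String) (before_context : Int) (after_context : Int) (filename : String) (show_filename : Bool) (line_numbers : Bool) (use_color : Bool) : Prop :=
  (∀ p ∈ match_indices, p.1 ≠ -after_context - 2) ∨ (∀ p ∈ match_indices, p.1 ≤ -after_context - 2)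
instance (match_indices : List (Int × String)) (file_contents : List String) (before_context : Int) (after_context : Int) (filename : String) (show_filename : Bool) (line_numbers : Bool) (use_color : Bool) : Decidable (Pre_render_context_to_lines_py match_indices file_contents before_context after_context filename show_filename line_numbers use_color) := by unfold Pre_render_context_to_lines_py; infer_instance

def pvWitness_render_context_to_lines_py : (List (Int × String)) × List String × Int × Int × String × Bool × Bool × Bool :=
  ([(0, "m"), (3, "y")], ["a", "b", "c", "d"], 1, 0, "f", true, true, false)

def Spec_render_context_to_lines_py (match_indices : List (Int × String)) (file_contents : List String) (before_context : Int) (after_context : Int) (filename : String) (show_filename : Bool) (line_numbers : Bool) (use_color : Bool) (out : List String) : Prop := out = render_context_to_lines_py_alt match_indices file_contents before_context after_context filename show_filename line_numbers use_color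
instance (match_indices : List (Int × String)) (file_contents : List String) (before_context : Int) (after_context : Int) (filename : String) (show_filename : Bool) (line_numbers : Bool) (use_color : Bool) (out : List String) : Decidable (Spec_render_context_to_lines_py match_indices file_contents before_context after_context filename show_filename line_numbers use_color out) := by unfold Spec_render_context_to_lines_py; infer_instance

-- ===== CLAIM (what is proved, stated in full; the proofs are below) =====
def Claim_equal_render_context_to_lines_py : Prop := ∀ (match_indices : List (Int × String)) (file_contents : List String) (before_context : Int) (after_context : Int) (filename : String) (show_filename : Bool) (line_numbers : Bool) (use_color : Bool), Dom_render_context_to_lines_py match_indices file_contents before_context after_context filename show_filename line_numbers use_color → Pre_render_context_to_lines_py match_indices file_contents before_context after_context filename show_filename line_numbers use_color → Spec_render_context_to_lines_py match_indices file_contents before_context after_context filename show_filename line_numbers use_color (render_context_to_lines_py match_indices file_contents before_context after_context filename show_filename line_numbers use_color)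

-- ===== LEMMAS AND PROOFS =====

def pvToIv (b a n idx : Int) : Int × Int := (max 0 (idx - b), min n (idx + a + 1))

def pvMergeAux : (Int × Int) → List (Int × Int) → List (Int × Int)
  | cur, [] => [cur]
  | cur, iv :: r => if iv.1 ≤ cur.2 then pvMergeAux (cur.1, max cur.2 iv.2) r else cur :: pvMergeAux iv r

def pvRenderRest (f : Int → String) (sep : String) : List (Int × Int) → List String
  | [] => []
  | r :: t => sep :: ((PySem.List.pyRange r.1 r.2 1).map f ++ pvRenderRest f sep t)

def pvRenderAll (f : Int → String) (sep : String) : List (Int × Int) → List String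
  | [] => []
  | r :: t => (PySem.List.pyRange r.1 r.2 1).map f ++ pvRenderRest f sep t

def pvIvInv : (Int × Int) → List (Int × Int) → Prop
  | _, [] => True
  | cur, iv :: r => cur.2 ≠ -1 ∧ cur.1 ≤ iv.1 ∧ cur.2 ≤ iv.2 ∧ pvIvInv iv r

theorem pvMergeAux_ne_nil (cur : Int × Int) (l : List (Int × Int)) : pvMergeAux cur l ≠ [] := by
  induction l generalizing cur with
  | nil => simp [pvMergeAux]
  | cons iv r ih =>
    unfold pvMergeAux
    split
    · exact ih _
    · simp

theorem pvRenderRest_eq_of_ne_nil (f : Int → String) (sep : String) (l : List (Int × Int)) (h : l ≠ []) :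
    pvRenderRest f sep l = sep :: pvRenderAll f sep l := by
  cases l with
  | nil => simp at h
  | cons r t => simp [pvRenderRest, pvRenderAll]

theorem pvIvInv_widen (c1 : Int) (s e : Int) (l : List (Int × Int)) (h : pvIvInv (s, e) l) (hc : c1 ≤ s) :
    pvIvInv (c1, e) l := by
  cases l with
  | nil => trivial
  | cons iv r =>
    obtain ⟨h1, h2, h3, h4⟩ := h
    exact ⟨h1, by omega, h3, h4⟩

theorem mem_keys_ofList {x : Int} {l : List (Int × String)} (h : x ∈ (PySem.Dict.ofList l).keys) :
    ∃ p ∈ l, p.1 = x := by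
  unfold PySem.Dict.ofList PySem.Dict.update at h
  rw [PySem.Dict.keys_foldl_insert_key l Prod.fst (fun _ p => p.2) PySem.Dict.empty, PySem.Dict.keys_empty] at h
  rw [PySem.Set.mem_update] at h
  simp at h
  obtain ⟨b, hb⟩ := h
  exact ⟨(x, b), hb, rfl⟩

-- B's merge loop computes pvMergeAux over the mapped windows
theorem mergeLoopB_eq (b a n : Int) : ∀ (keys : List Int) (ranges : List (Int × Int)) (c : Int × Int),
    mergeLoopB b a n keys ranges (some c) = ranges ++ pvMergeAux c (keys.map (pvToIv b a n)) := by
  intro keys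
  induction keys with
  | nil => intro ranges c; simp [mergeLoopB, pvMergeAux]
  | cons idx rest ih =>
    intro ranges c
    unfold mergeLoopB
    simp only [List.map_cons, pvMergeAux, pvToIv]
    split
    · rw [ih]
    · rw [ih]; simp

-- B's render loop computes pvRenderRest / pvRenderAll
theorem renderLoopB_true (f : Int → String) (sep : String) : ∀ (rs : List (Int × Int)) (out : List String),
    renderLoopB f sep rs out true = out ++ pvRenderRest f sep rs := by
  intro rs
  induction rs with
  | nil => intro out; simp [renderLoopB, pvRenderRest]
  | cons r t ih =>
    intro out
    unfold renderLoopB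
    rw [ih]
    simp [pvRenderRest]

theorem renderLoopB_false (f : Int → String) (sep : String) (rs : List (Int × Int)) :
    renderLoopB f sep rs [] false = pvRenderAll f sep rs := by
  cases rs with
  | nil => simp [renderLoopB, pvRenderAll]
  | cons r t =>
    unfold renderLoopB
    simp only [if_neg (by simp : ¬ (false = true))]
    rw [renderLoopB_true]
    simp [pvRenderAll]

-- A's loop, given the window-chain invariant, equals render-after-merge
theorem renderLoopA_eq (md : PySem.Dict Int String) (file_contents : List String)
    (b a : Int) (filename : String) (sf ln uc : Bool) :
    ∀ (keys : List Int) (acc : List String) (cur : Int × Int),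
    pvIvInv cur (keys.map (pvToIv b a (file_contents.length : Int))) →
    renderLoopA md file_contents b a filename sf ln uc keys
      (acc ++ (PySem.List.pyRange cur.1 cur.2 1).map
        (pvLineFor md file_contents filename sf ln uc)) cur.2
    = acc ++ pvRenderAll (pvLineFor md file_contents filename sf ln uc)
        (if uc then pyBOLD ++ pyBLUE ++ "--" ++ pyRESET else "--")
        (pvMergeAux cur (keys.map (pvToIv b a (file_contents.length : Int)))) := by
  intro keys
  induction keys with
  | nil => intro acc cur _; simp [renderLoopA, pvMergeAux, pvRenderAll, pvRenderRest]
  | cons idx rest ih =>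
    intro acc cur hinv
    simp only [List.map_cons, pvToIv] at hinv
    obtain ⟨h1, h2, h3, h4⟩ := hinv
    have h2' : cur.1 ≤ max 0 (idx - b) := h2
    have h3' : cur.2 ≤ min (file_contents.length : Int) (idx + a + 1) := h3
    clear h2 h3
    have hm_cons : ∀ (c : Int × Int), pvMergeAux c (List.map (pvToIv b a (file_contents.length : Int)) (idx :: rest)) =
        if max 0 (idx - b) ≤ c.2 then
          pvMergeAux (c.1, max c.2 (min (file_contents.length : Int) (idx + a + 1))) (List.map (pvToIv b a (file_contents.length : Int)) rest)
        else c :: pvMergeAux (max 0 (idx - b), min (file_contents.length : Int) (idx + a + 1)) (List.map (pvToIv b a (file_contents.length : Int)) rest) := by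
      intro c; simp only [List.map_cons, pvMergeAux, pvToIv]
    unfold renderLoopA
    simp only []
    rw [show (fun j => format_search_line filename j (if md.contains j = true then (md.get? j).getD "" else (PySem.List.pyGet? file_contents j).getD "") (md.contains j) sf ln uc) = pvLineFor md file_contents filename sf ln uc from rfl]
    rw [hm_cons cur]
    by_cases hse : max 0 (idx - b) ≤ cur.2
    · -- merge case: no separator, rendering continues at cur.2
      rw [if_neg (c := cur.2 ≠ -1 ∧ max 0 (idx - b) > cur.2) (by omega), if_pos (c := max 0 (idx - b) ≤ cur.2) hse]
      rw [show max (max 0 (idx - b)) cur.2 = cur.2 from by omega]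
      rw [show max cur.2 (min (file_contents.length : Int) (idx + a + 1)) = min (file_contents.length : Int) (idx + a + 1) from by omega]
      rw [List.append_assoc, ← List.map_append,
        ← PySem.List.pyRange_one_append cur.1 cur.2 (min (file_contents.length : Int) (idx + a + 1)) (by omega) (by omega)]
      have hwid : pvIvInv (cur.1, min (file_contents.length : Int) (idx + a + 1))
          (rest.map (pvToIv b a (file_contents.length : Int))) :=
        pvIvInv_widen cur.1 _ _ _ h4 (by omega)
      have := ih acc (cur.1, min (file_contents.length : Int) (idx + a + 1)) hwid
      simpa using this
    · -- new block: separator, rendering restarts at the window start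
      rw [if_pos (c := cur.2 ≠ -1 ∧ max 0 (idx - b) > cur.2) ⟨h1, by omega⟩, if_neg (c := max 0 (idx - b) ≤ cur.2) hse]
      rw [show max (max 0 (idx - b)) cur.2 = max 0 (idx - b) from by omega]
      have := ih (acc ++ (PySem.List.pyRange cur.1 cur.2 1).map (pvLineFor md file_contents filename sf ln uc)
          ++ [if uc then pyBOLD ++ pyBLUE ++ "--" ++ pyRESET else "--"])
          (max 0 (idx - b), min (file_contents.length : Int) (idx + a + 1)) h4
      simp only [] at this
      rw [this, pvRenderAll, pvRenderRest_eq_of_ne_nil _ _ _ (pvMergeAux_ne_nil _ _)]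
      simp [pvRenderAll, List.append_assoc]

-- the chain invariant holds for the sorted keys when no non-final key window ends at -1
theorem pvIvInv_of_keys (b a n : Int) (hn : 0 ≤ n) :
    ∀ (k : Int) (rest : List Int), (k :: rest).Pairwise (· < ·) →
    ((∀ x ∈ k :: rest, x ≠ -a - 2) ∨ (∀ x ∈ k :: rest, ¬ (-a - 2 < x))) →
    pvIvInv (pvToIv b a n k) (rest.map (pvToIv b a n)) := by
  intro k rest
  induction rest generalizing k with
  | nil => intro _ _; trivial
  | cons x r ih =>
    intro hpw hd
    have hkx : k < x := (List.pairwise_cons.mp hpw).1 x (by simp)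
    have hk2 : min n (k + a + 1) ≠ -1 := by
      rcases hd with hd | hd
      · have := hd k (by simp); omega
      · have h1 := hd k (by simp)
        have h2 := hd x (by simp)
        omega
    refine ⟨hk2, by dsimp [pvToIv]; omega, by dsimp [pvToIv]; omega, ?_⟩
    apply ih
    · exact (List.pairwise_cons.mp hpw).2
    · rcases hd with hd | hd
      · exact Or.inl (fun y hy => hd y (List.mem_cons_of_mem _ hy))
      · exact Or.inr (fun y hy => hd y (List.mem_cons_of_mem _ hy))

theorem sorted_keys_pairwise_lt (match_indices : List (Int × String)) :
    (PySem.List.sorted (PySem.Dict.ofList match_indices).keys (fun x => x) false).Pairwise (· < ·) := by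
  rw [← List.sortedLT_iff_pairwise]
  exact List.SortedLE.sortedLT_of_nodup
    (List.sortedLE_iff_pairwise.mpr (PySem.List.sorted_pairwise _ (fun x => x)))
    (((PySem.List.sorted_perm _ (fun x => x) false).nodup_iff).mpr (PySem.Dict.nodup_keys_ofList match_indices))

-- evaluating A's loop from the initial state (last_rendered_idx = -1)
theorem renderLoopA_start (md : PySem.Dict Int String) (file_contents : List String)
    (b a : Int) (filename : String) (sf ln uc : Bool) (k : Int) (rest : List Int) (acc : List String)
    (hinv : pvIvInv (pvToIv b a (file_contents.length : Int) k) (rest.map (pvToIv b a (file_contents.length : Int)))) :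
    renderLoopA md file_contents b a filename sf ln uc (k :: rest) acc (-1)
    = acc ++ pvRenderAll (pvLineFor md file_contents filename sf ln uc)
        (if uc then pyBOLD ++ pyBLUE ++ "--" ++ pyRESET else "--")
        (pvMergeAux (pvToIv b a (file_contents.length : Int) k) (rest.map (pvToIv b a (file_contents.length : Int)))) := by
  unfold renderLoopA
  simp only []
  rw [if_neg (c := (-1 : Int) ≠ -1 ∧ max 0 (k - b) > -1) (by simp)]
  rw [show max (max 0 (k - b)) (-1) = max 0 (k - b) from by omega]
  rw [show (fun j => format_search_line filename j (if md.contains j = true then (md.get? j).getD "" else (PySem.List.pyGet? file_contents j).getD "") (md.contains j) sf ln uc) = pvLineFor md file_contents filename sf ln uc from rfl]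
  have := renderLoopA_eq md file_contents b a filename sf ln uc rest acc (pvToIv b a (file_contents.length : Int) k) hinv
  simp only [pvToIv] at this
  exact this

-- evaluating B from a non-empty sorted key list
theorem alt_eval (match_indices : List (Int × String)) (file_contents : List String)
    (b a : Int) (filename : String) (sf ln uc : Bool) (k : Int) (rest : List Int)
    (hk : PySem.List.sorted (PySem.Dict.ofList match_indices).keys (fun x => x) false = k :: rest) :
    render_context_to_lines_py_alt match_indices file_contents b a filename sf ln uc
    = pvRenderAll (pvLineFor (PySem.Dict.ofList match_indices) file_contents filename sf ln uc)
        (if uc then pyBOLD ++ pyBLUE ++ "--" ++ pyRESET else "--")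
        (pvMergeAux (pvToIv b a (file_contents.length : Int) k) (rest.map (pvToIv b a (file_contents.length : Int)))) := by
  unfold render_context_to_lines_py_alt
  simp only []
  rw [hk]
  unfold mergeLoopB
  simp only []
  rw [mergeLoopB_eq, renderLoopB_false]
  simp [pvToIv]

-- ===== VERDICT (by name: the statement is the Claim_ definition above) =====
theorem render_context_to_lines_py_spec : Claim_equal_render_context_to_lines_py := by
  intro match_indices file_contents b a filename sf ln uc _ hpre
  show _ = _
  have hdisj : (∀ x ∈ PySem.List.sorted (PySem.Dict.ofList match_indices).keys (fun x => x) false, x ≠ -a - 2)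
      ∨ (∀ x ∈ PySem.List.sorted (PySem.Dict.ofList match_indices).keys (fun x => x) false, ¬ (-a - 2 < x)) := by
    rcases hpre with hP | hP
    · left
      intro x hx hx2
      obtain ⟨p, hp, hp1⟩ := mem_keys_ofList ((PySem.List.mem_sorted _ (fun x => x) false x).mp hx)
      have := hP p hp
      omega
    · right
      intro x hx hx2
      obtain ⟨p, hp, hp1⟩ := mem_keys_ofList ((PySem.List.mem_sorted _ (fun x => x) false x).mp hx)
      have := hP p hp
      omega
  cases hk : PySem.List.sorted (PySem.Dict.ofList match_indices).keys (fun x => x) false with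
  | nil =>
    unfold render_context_to_lines_py render_context_to_lines_py_alt
    simp only []
    rw [hk]
    rfl
  | cons k rest =>
    rw [hk] at hdisj
    have hpw := sorted_keys_pairwise_lt match_indices
    rw [hk] at hpw
    have hinv : pvIvInv (pvToIv b a (file_contents.length : Int) k) (rest.map (pvToIv b a (file_contents.length : Int))) :=
      pvIvInv_of_keys b a _ (Int.natCast_nonneg _) k rest hpw hdisj
    rw [alt_eval match_indices file_contents b a filename sf ln uc k rest hk]
    unfold render_context_to_lines_py
    simp only []
    rw [hk, renderLoopA_start _ _ _ _ _ _ _ _ k rest [] hinv]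
    simp
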